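-- pv_equiv track=rewrite | github.com/Doadaodao/DRL-Assignment-2 | n_tuple_TD.py | generate_symmetries
-- ===== SOURCE A (Python) =====
-- def identity(pattern):
--     return pattern
--
-- def rot90(pattern):
--     return [(c, 3 - r) for (r, c) in pattern]
--
-- def rot180(pattern):
--     return [(3 - r, 3 - c) for (r, c) in pattern]
--
-- def rot270(pattern):
--     return [(3 - c, r) for (r, c) in pattern]
--
-- def reflect_horizontal(pattern):
--     return [(r, 3 - c) for (r, c) in pattern]
--
-- def generate_symmetries(pattern):
--     """
--     Generate the eight symmetric transformations of the input pattern.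
--     These include the identity, rotations (90, 180, 270 degrees) and
--     the horizontal reflections of each.
--     """
--     sym = []
--     for transform in [identity, rot90, rot180, rot270]:
--         p = transform(pattern)
--         sym.append(p)
--         sym.append(reflect_horizontal(p))
--     # Remove duplicates if any symmetry maps the pattern onto itself.
--     unique = []
--     for s in sym:
--         if s not in unique:
--             unique.append(s)
--     return unique
-- ===== SOURCE B (Python) =====
-- def generate_symmetries(pattern):
--     """Group-theoretic version: each symmetry is a D4 element (k, m) acting as
--     reflect^m o rot90^k.  Compute the pattern's pointwise stabilizer subgroup
--     once, keep one element per left coset (first occurrence), and only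
--     materialize the transformed pattern for the kept representatives."""
--     def rot(p):
--         r, c = p
--         return (c, 3 - r)
--
--     def apply(g, p):
--         k, m = g
--         for _ in range(k):
--             p = rot(p)
--         if m:
--             p = (p[0], 3 - p[1])
--         return p
--
--     def compose(g, h):  # map of g applied after map of h
--         k2, m2 = g
--         k1, m1 = h
--         return ((k1 + (-k2 if m1 else k2)) % 4, m1 != m2)
--
--     def inverse(g):
--         k, m = g
--         return (k, True) if m else ((-k) % 4, False)
--
--     elems = [(k, m) for k in range(4) for m in (False, True)]
--     stab = {g for g in elems if all(apply(g, p) == p for p in pattern)}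
--     kept = []
--     for g in elems:
--         if not any(compose(inverse(h), g) in stab for h in kept):
--             kept.append(g)
--     return [[apply(g, p) for p in pattern] for g in kept]
-- ===== Notes on version B (the rewrite author's own statement) =====
-- stated objective: alternative
-- what changed: B works in the dihedral group D4 instead of on transformed lists: it computes the pattern's pointwise stabilizer subgroup once, dedups by checking whether inverse(h)*g lies in that subgroup (one representative per left coset, first occurrence kept), and materializes transformed patterns only for the kept representatives; A materializes all eight lists and dedups them by list-membership comparison.
import Mathlib
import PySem

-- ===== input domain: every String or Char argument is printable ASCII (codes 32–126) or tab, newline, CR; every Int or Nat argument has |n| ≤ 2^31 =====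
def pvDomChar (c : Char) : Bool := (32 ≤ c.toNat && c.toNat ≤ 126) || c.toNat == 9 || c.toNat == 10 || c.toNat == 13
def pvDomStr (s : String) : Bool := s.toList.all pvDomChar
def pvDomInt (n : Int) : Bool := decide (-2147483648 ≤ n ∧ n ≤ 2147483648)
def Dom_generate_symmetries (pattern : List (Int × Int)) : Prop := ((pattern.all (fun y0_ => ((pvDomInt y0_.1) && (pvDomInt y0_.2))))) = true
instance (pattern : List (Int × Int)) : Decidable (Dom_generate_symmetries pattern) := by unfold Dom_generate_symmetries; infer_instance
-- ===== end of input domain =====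

-- B replaces A's eight materialized lists + list-membership dedup by a D4 group
-- computation: a pointwise stabilizer subgroup and one representative per left
-- coset (objective: alternative algorithm, same asymptotic cost).

-- ===== PORT A =====
-- Python helpers of A, ported one-to-one
def pyIdentity (pattern : List (Int × Int)) : List (Int × Int) := pattern
def pyRot90 (pattern : List (Int × Int)) : List (Int × Int) := pattern.map (fun rc => (rc.2, 3 - rc.1))
def pyRot180 (pattern : List (Int × Int)) : List (Int × Int) := pattern.map (fun rc => (3 - rc.1, 3 - rc.2))
def pyRot270 (pattern : List (Int × Int)) : List (Int × Int) := pattern.map (fun rc => (3 - rc.2, rc.1))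
def pyReflH (pattern : List (Int × Int)) : List (Int × Int) := pattern.map (fun rc => (rc.1, 3 - rc.2))
def generate_symmetries (pattern : List (Int × Int)) : List (List (Int × Int)) :=
  let sym := [pyIdentity, pyRot90, pyRot180, pyRot270].foldl
    (fun acc t => (acc ++ [t pattern]) ++ [pyReflH (t pattern)]) []
  sym.foldl (fun u s => if s ∈ u then u else u ++ [s]) []

-- ===== PORT B =====
-- B: one D4 element is (k, m) : Int × Bool, acting as reflect^m ∘ rot90^k
def bRot (p : Int × Int) : Int × Int := (p.2, 3 - p.1)
-- 'for _ in range(k): p = rot(p)' then optional reflection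
def bApply (g : Int × Bool) (p : Int × Int) : Int × Int :=
  let q := (List.range g.1.toNat).foldl (fun q _ => bRot q) p
  if g.2 then (q.1, 3 - q.2) else q
def bCompose (g h : Int × Bool) : Int × Bool :=
  (PySem.Int.mod (h.1 + (if h.2 then -g.1 else g.1)) 4, h.2 != g.2)
def bInverse (g : Int × Bool) : Int × Bool :=
  if g.2 then (g.1, true) else (PySem.Int.mod (-g.1) 4, false)
def bElems : List (Int × Bool) :=
  (List.range 4).flatMap (fun k => [((k : Int), false), ((k : Int), true)])
def generate_symmetries_alt (pattern : List (Int × Int)) : List (List (Int × Int)) :=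
  let stab : PySem.Set (Int × Bool) :=
    PySem.Set.ofList (bElems.filter (fun g => pattern.all (fun p => bApply g p == p)))
  let kept := bElems.foldl
    (fun kept g => if kept.any (fun h => bCompose (bInverse h) g ∈ stab) then kept else kept ++ [g]) []
  kept.map (fun g => pattern.map (fun p => bApply g p))

-- ===== PRECONDITION & SPEC =====
def Spec_generate_symmetries (pattern : List (Int × Int)) (out : List (List (Int × Int))) : Prop := out = generate_symmetries_alt pattern
instance (pattern : List (Int × Int)) (out : List (List (Int × Int))) : Decidable (Spec_generate_symmetries pattern out) := by unfold Spec_generate_symmetries; infer_instance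

-- ===== CLAIM (what is proved, stated in full; the proofs are below) =====
def Claim_equal_generate_symmetries : Prop := ∀ (pattern : List (Int × Int)), Dom_generate_symmetries pattern → Spec_generate_symmetries pattern (generate_symmetries pattern)

-- ===== LEMMAS AND PROOFS =====
-- bStab names B's stabilizer set so the lemmas below can speak about it (definitionally the alt port's `stab`)
def bStab (pattern : List (Int × Int)) : PySem.Set (Int × Bool) :=
  PySem.Set.ofList (bElems.filter (fun g => pattern.all (fun p => bApply g p == p)))

lemma mem_bElems_iff (g : Int × Bool) :
    g ∈ bElems ↔ g = (0, false) ∨ g = (0, true) ∨ g = (1, false) ∨ g = (1, true) ∨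
      g = (2, false) ∨ g = (2, true) ∨ g = (3, false) ∨ g = (3, true) := by
  simp [bElems, List.range_succ]


lemma bClosure (g h : Int × Bool) (hg : g ∈ bElems) (hh : h ∈ bElems) :
    bCompose (bInverse h) g ∈ bElems := by
  rw [mem_bElems_iff] at hg hh
  rcases hg with rfl|rfl|rfl|rfl|rfl|rfl|rfl|rfl <;>
    rcases hh with rfl|rfl|rfl|rfl|rfl|rfl|rfl|rfl <;> decide

lemma key (g h : Int × Bool) (hg : g ∈ bElems) (hh : h ∈ bElems) (p : Int × Int) :
    bApply (bCompose (bInverse h) g) p = p ↔ bApply g p = bApply h p := by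
  rw [mem_bElems_iff] at hg hh
  rcases hg with rfl|rfl|rfl|rfl|rfl|rfl|rfl|rfl <;>
    rcases hh with rfl|rfl|rfl|rfl|rfl|rfl|rfl|rfl <;>
    simp [bApply, bCompose, bInverse, bRot, PySem.Int.mod, List.range_succ,
      Prod.ext_iff] <;> omega

lemma mem_bStab_iff (pattern : List (Int × Int)) (e : Int × Bool) :
    e ∈ bStab pattern ↔ e ∈ bElems ∧ ∀ p ∈ pattern, bApply e p = p := by
  simp [bStab, pysem, List.mem_filter]

lemma dedup_cond (pattern : List (Int × Int)) (g : Int × Bool) (kept : List (Int × Bool))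
    (hg : g ∈ bElems) (hk : ∀ h ∈ kept, h ∈ bElems) :
    (pattern.map (fun p => bApply g p) ∈ kept.map (fun h => pattern.map (fun p => bApply h p)))
      ↔ kept.any (fun h => bCompose (bInverse h) g ∈ bStab pattern) = true := by
  simp only [List.mem_map, List.any_eq_true, decide_eq_true_eq]
  constructor
  · rintro ⟨h, hmem, heq⟩
    refine ⟨h, hmem, ?_⟩
    rw [mem_bStab_iff]
    refine ⟨bClosure g h hg (hk h hmem), fun p hp => ?_⟩
    rw [key g h hg (hk h hmem)]
    exact (List.map_inj_left.mp heq p hp).symm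
  · rintro ⟨h, hmem, hstab⟩
    refine ⟨h, hmem, ?_⟩
    rw [mem_bStab_iff] at hstab
    exact List.map_inj_left.mpr fun p hp =>
      ((key g h hg (hk h hmem) p).mp (hstab.2 p hp)).symm

lemma fold_corr (pattern : List (Int × Int)) (l kept : List (Int × Bool))
    (hl : ∀ g ∈ l, g ∈ bElems) (hk : ∀ h ∈ kept, h ∈ bElems) :
    (l.map (fun g => pattern.map (fun p => bApply g p))).foldl
        (fun u s => if s ∈ u then u else u ++ [s])
        (kept.map (fun h => pattern.map (fun p => bApply h p)))
      = (l.foldl (fun kept g =>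
          if kept.any (fun h => bCompose (bInverse h) g ∈ bStab pattern) then kept
          else kept ++ [g]) kept).map (fun h => pattern.map (fun p => bApply h p)) := by
  induction l generalizing kept with
  | nil => simp
  | cons g l ih =>
    have hg : g ∈ bElems := hl g (List.mem_cons_self ..)
    have hl' : ∀ x ∈ l, x ∈ bElems := fun x hx => hl x (List.mem_cons_of_mem _ hx)
    simp only [List.map_cons, List.foldl_cons]
    by_cases hc : (kept.any fun h => bCompose (bInverse h) g ∈ bStab pattern) = true
    · rw [if_pos ((dedup_cond pattern g kept hg hk).mpr hc), if_pos hc]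
      exact ih kept hl' hk
    · rw [if_neg (fun hmem => hc ((dedup_cond pattern g kept hg hk).mp hmem)), if_neg hc]
      have hk' : ∀ h ∈ kept ++ [g], h ∈ bElems := by
        intro h hh
        rcases List.mem_append.mp hh with h1 | h1
        · exact hk h h1
        · rw [List.mem_singleton.mp h1]; exact hg
      have hmap : (kept.map (fun h => pattern.map (fun p => bApply h p))) ++
          [pattern.map (fun p => bApply g p)] =
          (kept ++ [g]).map (fun h => pattern.map (fun p => bApply h p)) := by simp
      rw [hmap]
      exact ih (kept ++ [g]) hl' hk'

lemma bApply_pt (p : Int × Int) :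
    bApply (0, false) p = p ∧ bApply (0, true) p = (p.1, 3 - p.2) ∧
    bApply (1, false) p = (p.2, 3 - p.1) ∧ bApply (1, true) p = (p.2, 3 - (3 - p.1)) ∧
    bApply (2, false) p = (3 - p.1, 3 - p.2) ∧ bApply (2, true) p = (3 - p.1, 3 - (3 - p.2)) ∧
    bApply (3, false) p = (3 - p.2, 3 - (3 - p.1)) ∧ bApply (3, true) p = (3 - p.2, 3 - (3 - (3 - p.1))) := by
  simp [bApply, bRot, List.range_succ]

lemma bApply_map (pattern : List (Int × Int)) :
    pattern.map (fun p => bApply (0, false) p) = pyIdentity pattern ∧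
    pattern.map (fun p => bApply (0, true) p) = pyReflH (pyIdentity pattern) ∧
    pattern.map (fun p => bApply (1, false) p) = pyRot90 pattern ∧
    pattern.map (fun p => bApply (1, true) p) = pyReflH (pyRot90 pattern) ∧
    pattern.map (fun p => bApply (2, false) p) = pyRot180 pattern ∧
    pattern.map (fun p => bApply (2, true) p) = pyReflH (pyRot180 pattern) ∧
    pattern.map (fun p => bApply (3, false) p) = pyRot270 pattern ∧
    pattern.map (fun p => bApply (3, true) p) = pyReflH (pyRot270 pattern) := by
  refine ⟨?_, ?_, ?_, ?_, ?_, ?_, ?_, ?_⟩ <;>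
    simp only [pyIdentity, pyReflH, pyRot90, pyRot180, pyRot270, List.map_map] <;>
    [exact List.map_id' pattern; skip; skip; skip; skip; skip; skip; skip] <;>
    exact List.map_congr_left fun p _ => by
      have h := bApply_pt p
      obtain ⟨h0, h1, h2, h3, h4, h5, h6, h7⟩ := h
      simp only [Function.comp_def, h1, h2, h3, h4, h5, h6, h7, Prod.mk.injEq]
      all_goals exact ⟨trivial, by omega⟩

lemma symA_eq (pattern : List (Int × Int)) :
    [pyIdentity pattern, pyReflH (pyIdentity pattern), pyRot90 pattern, pyReflH (pyRot90 pattern),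
     pyRot180 pattern, pyReflH (pyRot180 pattern), pyRot270 pattern, pyReflH (pyRot270 pattern)]
      = bElems.map (fun g => pattern.map (fun p => bApply g p)) := by
  have hb : bElems = [(0, false), (0, true), (1, false), (1, true), (2, false), (2, true), (3, false), (3, true)] := by
    simp [bElems, List.range_succ]
  obtain ⟨e0, e1, e2, e3, e4, e5, e6, e7⟩ := bApply_map pattern
  rw [hb]
  simp only [List.map_cons, List.map_nil, e0, e1, e2, e3, e4, e5, e6, e7]


-- ===== VERDICT (by name: the statement is the Claim_ definition above) =====
theorem generate_symmetries_spec : Claim_equal_generate_symmetries := by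
  intro pattern _
  show generate_symmetries pattern = generate_symmetries_alt pattern
  have hfc := fold_corr pattern bElems [] (fun g hg => hg) (by simp)
  simp only [List.map_nil] at hfc
  have hsym : [pyIdentity, pyRot90, pyRot180, pyRot270].foldl
      (fun acc t => (acc ++ [t pattern]) ++ [pyReflH (t pattern)]) ([] : List (List (Int × Int)))
      = [pyIdentity pattern, pyReflH (pyIdentity pattern), pyRot90 pattern, pyReflH (pyRot90 pattern),
         pyRot180 pattern, pyReflH (pyRot180 pattern), pyRot270 pattern, pyReflH (pyRot270 pattern)] := by
    simp
  show ([pyIdentity, pyRot90, pyRot180, pyRot270].foldl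
      (fun acc t => (acc ++ [t pattern]) ++ [pyReflH (t pattern)]) []).foldl
      (fun u s => if s ∈ u then u else u ++ [s]) [] = generate_symmetries_alt pattern
  rw [hsym, symA_eq pattern, hfc]
  rfl
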